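-- pv_equiv track=rewrite | github.com/timmahrt/pysle | pysle/phonetics.py | _chooseMostSimilarWithStress
-- ===== SOURCE A (Python) =====
-- from typing import List, Optional, Tuple, Union, TypeVar
--
-- def _chooseMostSimilarWithStress(
--     numDiffList: List[int], withStress: List[bool]
-- ) -> Optional[int]:
--     """Choose the index with the smallest number of differences; prefer stressed options
--
--     If two indicies are tied for the smallest number of differences, choose a stressed
--     one over an unstressed.
--
--     If two indicies are tied for the smallest number of differences and are equal in
--     stress status, choose the first option.
--
--     numDiffList and withStress should be the same length
--     """
--     minDiff = min(numDiffList)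
--
--     # When there are multiple candidates that have the minimum number
--     #     of differences, prefer one that has stress in it
--     bestIndex = None
--     bestIsStressed = None
--     for i, numDiff in enumerate(numDiffList):
--         if numDiff != minDiff:
--             continue
--         if bestIndex is None:
--             bestIndex = i
--             bestIsStressed = withStress[i]
--         else:
--             if not bestIsStressed and withStress[i]:
--                 bestIndex = i
--                 bestIsStressed = True
--
--     return bestIndex
-- ===== SOURCE B (Python) =====
-- def _chooseMostSimilarWithStress(numDiffList, withStress):
--     # Single pass: argmin by the lexicographic key (numDiff, not stressed);
--     # strict '<' keeps the first index on ties.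
--     best = None  # (key, index) of the current best candidate
--     for i, numDiff in enumerate(numDiffList):
--         key = (numDiff, not withStress[i])
--         if best is None or key < best[0]:
--             best = (key, i)
--     return best[1] if best is not None else None
-- ===== Notes on version B (the rewrite author's own statement) =====
-- stated objective: simpler
-- what changed: Replaces A's two-phase scheme (compute min(numDiffList), then a second scan with stateful stressed-upgrade tie-breaking) with one pass that keeps the argmin of the lexicographic key (numDiff, not stressed), strict '<' keeping the first index on ties.
-- outside the precondition, e.g. on _chooseMostSimilarWithStress([3, 5], [True]): A returns 0, B raises IndexError
import Mathlib
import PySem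

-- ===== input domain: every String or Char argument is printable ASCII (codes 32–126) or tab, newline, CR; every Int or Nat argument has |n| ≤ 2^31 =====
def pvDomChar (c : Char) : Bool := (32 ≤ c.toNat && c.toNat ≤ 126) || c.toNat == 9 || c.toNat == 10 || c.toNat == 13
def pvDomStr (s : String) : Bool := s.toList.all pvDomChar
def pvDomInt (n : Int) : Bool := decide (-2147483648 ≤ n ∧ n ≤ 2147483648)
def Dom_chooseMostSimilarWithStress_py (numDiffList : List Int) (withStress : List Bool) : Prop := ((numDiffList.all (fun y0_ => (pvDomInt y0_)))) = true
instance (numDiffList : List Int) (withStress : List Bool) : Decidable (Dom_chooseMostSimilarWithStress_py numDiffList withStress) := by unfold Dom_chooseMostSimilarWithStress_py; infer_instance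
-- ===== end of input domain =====

-- B replaces A's two-phase "global min, then stateful stress tie-break" with one
-- pass keeping the argmin of the lexicographic key (numDiff, not stressed): simpler.

-- ===== PORT A =====
def chooseMostSimilarWithStress_py (numDiffList : List Int) (withStress : List Bool) : Option Int :=
  match PySem.List.min? numDiffList (fun x => x) with
  | none => none   -- Python: min([]) raises ValueError (excluded by Pre_)
  | some minDiff =>
    ((PySem.List.enumerate numDiffList).foldl
      (fun (st : Option (Int × Bool)) (p : Int × Int) =>
        if p.2 ≠ minDiff then st
        else
          match st with
          | none => some (p.1, PySem.List.pyGetD withStress p.1 false)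
          | some (bestIndex, bestIsStressed) =>
            if !bestIsStressed && PySem.List.pyGetD withStress p.1 false then
              some (p.1, true)
            else some (bestIndex, bestIsStressed))
      none).map Prod.fst

-- ===== PORT B =====
-- Python tuple comparison (numDiff, not stressed) < (numDiff', not stressed'): lexicographic, False < True
def pvKeyLt (a b : Int × Bool) : Bool := a.1 < b.1 || (a.1 == b.1 && (!a.2 && b.2))

def chooseMostSimilarWithStress_py_alt (numDiffList : List Int) (withStress : List Bool) : Option Int :=
  ((PySem.List.enumerate numDiffList).foldl
    (fun (best : Option ((Int × Bool) × Int)) (p : Int × Int) =>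
      let key : Int × Bool := (p.2, !(PySem.List.pyGetD withStress p.1 false))
      match best with
      | none => some (key, p.1)
      | some (bk, bi) => if pvKeyLt key bk then some (key, p.1) else some (bk, bi))
    none).map Prod.snd

-- ===== PRECONDITION & SPEC =====
-- Pre_ excludes the empty list (A's min([]) raises ValueError) and withStress shorter than
-- numDiffList: the docstring requires equal lengths, and there A's partial reads may still
-- return a value while B (which reads withStress[i] for every i) raises IndexError.
def Pre_chooseMostSimilarWithStress_py (numDiffList : List Int) (withStress : List Bool) : Prop :=
  numDiffList ≠ [] ∧ numDiffList.length ≤ withStress.length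
instance (numDiffList : List Int) (withStress : List Bool) : Decidable (Pre_chooseMostSimilarWithStress_py numDiffList withStress) := by unfold Pre_chooseMostSimilarWithStress_py; infer_instance

def pvWitness_chooseMostSimilarWithStress_py : List Int × List Bool := ([2, 1, 1], [false, false, true])

def Spec_chooseMostSimilarWithStress_py (numDiffList : List Int) (withStress : List Bool) (out : Option Int) : Prop := out = chooseMostSimilarWithStress_py_alt numDiffList withStress
instance (numDiffList : List Int) (withStress : List Bool) (out : Option Int) : Decidable (Spec_chooseMostSimilarWithStress_py numDiffList withStress out) := by unfold Spec_chooseMostSimilarWithStress_py; infer_instance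

-- ===== CLAIM (what is proved, stated in full; the proofs are below) =====
def Claim_equal_chooseMostSimilarWithStress_py : Prop := ∀ (numDiffList : List Int) (withStress : List Bool), Dom_chooseMostSimilarWithStress_py numDiffList withStress → Pre_chooseMostSimilarWithStress_py numDiffList withStress → Spec_chooseMostSimilarWithStress_py numDiffList withStress (chooseMostSimilarWithStress_py numDiffList withStress)


-- ===== LEMMAS AND PROOFS =====

-- the two loop bodies, named so the invariant lemmas can speak about them
def pvStepA (minDiff : Int) (withStress : List Bool) (st : Option (Int × Bool)) (p : Int × Int) : Option (Int × Bool) :=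
  if p.2 ≠ minDiff then st
  else
    match st with
    | none => some (p.1, PySem.List.pyGetD withStress p.1 false)
    | some (bestIndex, bestIsStressed) =>
      if !bestIsStressed && PySem.List.pyGetD withStress p.1 false then
        some (p.1, true)
      else some (bestIndex, bestIsStressed)

def pvStepB (withStress : List Bool) (best : Option ((Int × Bool) × Int)) (p : Int × Int) : Option ((Int × Bool) × Int) :=
  let key : Int × Bool := (p.2, !(PySem.List.pyGetD withStress p.1 false))
  match best with
  | none => some (key, p.1)
  | some (bk, bi) => if pvKeyLt key bk then some (key, p.1) else some (bk, bi)

lemma portA_eq (numDiffList : List Int) (withStress : List Bool) :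
    chooseMostSimilarWithStress_py numDiffList withStress =
      match PySem.List.min? numDiffList (fun x => x) with
      | none => none
      | some minDiff =>
        ((PySem.List.enumerate numDiffList).foldl (pvStepA minDiff withStress) none).map Prod.fst := rfl

lemma portB_eq (numDiffList : List Int) (withStress : List Bool) :
    chooseMostSimilarWithStress_py_alt numDiffList withStress =
      ((PySem.List.enumerate numDiffList).foldl (pvStepB withStress) none).map Prod.snd := rfl

-- the invariant relating the two loop states after the same prefix
def pvRel (m : Int) (stA : Option (Int × Bool)) (stB : Option ((Int × Bool) × Int)) : Prop :=
  (stA = none ∧ stB = none) ∨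
  (stA = none ∧ ∃ v b i, stB = some ((v, b), i) ∧ m < v) ∨
  (∃ bi bs, stA = some (bi, bs) ∧ stB = some ((m, !bs), bi))

lemma pvRel_step (m : Int) (s : List Bool) (p : Int × Int) (hp : m ≤ p.2)
    (stA : Option (Int × Bool)) (stB : Option ((Int × Bool) × Int)) (h : pvRel m stA stB) :
    pvRel m (pvStepA m s stA p) (pvStepB s stB p) := by
  rcases h with ⟨hA, hB⟩ | ⟨hA, v, b, i, hB, hv⟩ | ⟨bi, bs, hA, hB⟩ <;> subst hA <;> subst hB
  · by_cases hm : p.2 = m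
    · refine Or.inr (Or.inr ⟨p.1, PySem.List.pyGetD s p.1 false, ?_, ?_⟩) <;>
        simp [pvStepA, pvStepB, hm]
    · exact Or.inr (Or.inl ⟨by simp [pvStepA, hm], p.2, !(PySem.List.pyGetD s p.1 false), p.1,
        by simp [pvStepB], lt_of_le_of_ne hp (fun h => hm h.symm)⟩)
  · by_cases hm : p.2 = m
    · refine Or.inr (Or.inr ⟨p.1, PySem.List.pyGetD s p.1 false, by simp [pvStepA, hm], ?_⟩)
      simp [pvStepB, pvKeyLt, hm, hv]
    · refine Or.inr (Or.inl ⟨by simp [pvStepA, hm], ?_⟩)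
      by_cases hlt : pvKeyLt (p.2, !(PySem.List.pyGetD s p.1 false)) (v, b)
      · exact ⟨p.2, !(PySem.List.pyGetD s p.1 false), p.1, by simp [pvStepB, hlt],
          lt_of_le_of_ne hp (fun h => hm h.symm)⟩
      · exact ⟨v, b, i, by simp [pvStepB, hlt], hv⟩
  · by_cases hm : p.2 = m
    · by_cases hg : PySem.List.pyGetD s p.1 false
      · by_cases hbs : bs
        · refine Or.inr (Or.inr ⟨bi, bs, ?_, ?_⟩) <;>
            simp [pvStepA, pvStepB, pvKeyLt, hm, hg, hbs]
        · refine Or.inr (Or.inr ⟨p.1, true, ?_, ?_⟩) <;>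
            simp_all [pvStepA, pvStepB, pvKeyLt]
      · refine Or.inr (Or.inr ⟨bi, bs, ?_, ?_⟩) <;>
          simp_all [pvStepA, pvStepB, pvKeyLt]
    · have hlt : ¬ (p.2 < m) := not_lt.mpr hp
      refine Or.inr (Or.inr ⟨bi, bs, by simp [pvStepA, hm], ?_⟩)
      simp [pvStepB, pvKeyLt, hm, hlt]

lemma pvRel_fold (m : Int) (s : List Bool) (l : List (Int × Int)) (hall : ∀ p ∈ l, m ≤ p.2) :
    ∀ stA stB, pvRel m stA stB →
      pvRel m (l.foldl (pvStepA m s) stA) (l.foldl (pvStepB s) stB) := by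
  induction l with
  | nil => intro stA stB h; exact h
  | cons p t ih =>
    intro stA stB h
    simp only [List.foldl_cons]
    exact ih (fun q hq => hall q (List.mem_cons_of_mem p hq))
      _ _ (pvRel_step m s p (hall p (List.mem_cons_self)) stA stB h)

lemma pvStepA_some (m : Int) (s : List Bool) (x : Int × Bool) (p : Int × Int) :
    pvStepA m s (some x) p ≠ none := by
  obtain ⟨bi, bs⟩ := x
  simp only [pvStepA]
  split_ifs <;> simp

lemma pvFoldA_some (m : Int) (s : List Bool) (l : List (Int × Int)) :
    ∀ x : Int × Bool, l.foldl (pvStepA m s) (some x) ≠ none := by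
  induction l with
  | nil => intro x; simp
  | cons p t ih =>
    intro x
    simp only [List.foldl_cons]
    rcases h : pvStepA m s (some x) p with _ | y
    · exact absurd h (pvStepA_some m s x p)
    · exact ih y

lemma pvFoldA_hit (m : Int) (s : List Bool) (l : List (Int × Int))
    (h : ∃ p ∈ l, p.2 = m) :
    ∀ stA, l.foldl (pvStepA m s) stA ≠ none := by
  induction l with
  | nil => simp at h
  | cons p t ih =>
    intro stA
    simp only [List.foldl_cons]
    rcases hst : pvStepA m s stA p with _ | y
    · -- the step left none, so stA = none and p.2 ≠ m; the hit is in the tail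
      rcases stA with _ | x
      · rcases h with ⟨q, hq, hqm⟩
        rcases List.mem_cons.mp hq with rfl | hq'
        · exfalso
          simp [pvStepA, hqm] at hst
        · exact ih ⟨q, hq', hqm⟩ none
      · exact absurd hst (pvStepA_some m s x p)
    · exact pvFoldA_some m s t y

-- ===== VERDICT (by name: the statement is the Claim_ definition above) =====
theorem chooseMostSimilarWithStress_py_spec : Claim_equal_chooseMostSimilarWithStress_py := by
  intro d s _ hpre
  obtain ⟨hne, _⟩ := hpre
  unfold Spec_chooseMostSimilarWithStress_py
  rcases hmin : PySem.List.min? d (fun x => x) with _ | m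
  · exact absurd ((PySem.List.min?_eq_none_iff _ _).mp hmin) hne
  have hmem : m ∈ d := PySem.List.min?_mem hmin
  have hisMin : ∀ y ∈ d, m ≤ y := fun y hy => PySem.List.min?_isMin hmin y hy
  have hall : ∀ p ∈ PySem.List.enumerate d 0, m ≤ p.2 := by
    intro p hp
    obtain ⟨k, hk, rfl⟩ := (PySem.List.mem_enumerate_iff _ _ _).mp hp
    exact hisMin _ (List.getElem_mem hk)
  have hhit : ∃ p ∈ PySem.List.enumerate d 0, p.2 = m := by
    obtain ⟨k, hk, hkm⟩ := List.mem_iff_getElem.mp hmem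
    exact ⟨((0 : Int) + k, d[k]), (PySem.List.mem_enumerate_iff _ _ _).mpr ⟨k, hk, rfl⟩, hkm⟩
  have hrel := pvRel_fold m s (PySem.List.enumerate d 0) hall none none (Or.inl ⟨rfl, rfl⟩)
  have hA := pvFoldA_hit m s (PySem.List.enumerate d 0) hhit none
  rw [portA_eq, portB_eq, hmin]
  rcases hrel with ⟨h1, _⟩ | ⟨h1, _⟩ | ⟨bi, bs, h1, h2⟩
  · exact absurd h1 hA
  · exact absurd h1 hA
  · simp [h1, h2]
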